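-- pv_equiv track=rewrite | github.com/MBGIRISH/Deal-Forensics | agents/timeline_agent.py | _generate_phase_summary
-- ===== SOURCE A (Python) =====
-- from typing import Any
--
-- REQUIRED_PHASES = [
--     "Discovery Phase",
--     "Pricing Negotiation Phase",
--     "Delivery Planning Phase",
--     "Issue/Escalation Phase",
--     "Final Decision Phase"
-- ]
--
-- def _generate_phase_summary(events: list[dict[str, Any]]) -> dict[str, str]:
--     """Generate phase summaries."""
--     summaries = {}
--     for phase in REQUIRED_PHASES:
--         phase_events = [e for e in events if e.get("phase") == phase]
--         if phase_events:
--             descriptions = [e.get("description", "") for e in phase_events[:3]]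
--             summaries[phase] = " | ".join(descriptions)
--         else:
--             summaries[phase] = f"Events occurred in {phase}"
--     return summaries
-- ===== SOURCE B (Python) =====
-- REQUIRED_PHASES = [
--     "Discovery Phase",
--     "Pricing Negotiation Phase",
--     "Delivery Planning Phase",
--     "Issue/Escalation Phase",
--     "Final Decision Phase"
-- ]
--
-- def _generate_phase_summary(events):
--     """Generate phase summaries: one grouping pass over events, then format."""
--     groups = {}
--     for e in events:
--         ph = e.get("phase")
--         if ph in REQUIRED_PHASES:
--             lst = groups.get(ph)
--             if lst is None:
--                 groups[ph] = [e.get("description", "")]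
--             elif len(lst) < 3:
--                 lst.append(e.get("description", ""))
--     return {ph: (" | ".join(groups[ph]) if ph in groups else f"Events occurred in {ph}")
--             for ph in REQUIRED_PHASES}
-- ===== Notes on version B (the rewrite author's own statement) =====
-- stated objective: alternative
-- what changed: Instead of rescanning the whole event list once per required phase (filter, slice, join), B makes a single grouping pass over events that collects at most 3 descriptions per required phase into a dict, then formats each of the 5 fixed phases in one pass over REQUIRED_PHASES.
import Mathlib
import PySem

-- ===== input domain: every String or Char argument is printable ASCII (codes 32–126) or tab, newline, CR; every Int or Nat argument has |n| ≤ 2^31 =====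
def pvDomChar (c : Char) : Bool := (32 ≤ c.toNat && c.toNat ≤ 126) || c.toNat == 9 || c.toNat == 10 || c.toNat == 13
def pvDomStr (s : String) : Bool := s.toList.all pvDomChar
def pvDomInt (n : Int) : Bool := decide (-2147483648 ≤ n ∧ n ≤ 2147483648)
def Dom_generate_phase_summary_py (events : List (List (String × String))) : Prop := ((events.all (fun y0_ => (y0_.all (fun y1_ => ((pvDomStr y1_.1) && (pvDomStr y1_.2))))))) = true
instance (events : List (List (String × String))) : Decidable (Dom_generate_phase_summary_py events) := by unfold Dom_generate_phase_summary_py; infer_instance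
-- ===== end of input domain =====

-- B replaces A's five rescans of `events` (one per required phase) by ONE grouping pass over
-- events (capped at 3 descriptions per phase) followed by one formatting pass over the phases.

def pvPhases : List String :=
  ["Discovery Phase", "Pricing Negotiation Phase", "Delivery Planning Phase",
   "Issue/Escalation Phase", "Final Decision Phase"]

def pvDesc (e : List (String × String)) : String :=
  PySem.Dict.getD (PySem.Dict.mk e) "description" ""

-- ===== PORT A =====
def generate_phase_summary_py (events : List (List (String × String))) : List (String × String) :=
  (pvPhases.foldl (fun summaries phase =>
    let phase_events := events.filter (fun e => PySem.Dict.get? (PySem.Dict.mk e) "phase" == some phase)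
    if phase_events.isEmpty then
      PySem.Dict.insert summaries phase ("Events occurred in " ++ phase)
    else
      PySem.Dict.insert summaries phase
        (PySem.Str.join " | " ((phase_events.take 3).map pvDesc))) PySem.Dict.empty).items

-- ===== PORT B =====
def pvCollect (events : List (List (String × String))) : PySem.Dict String (List String) :=
  events.foldl (fun groups e =>
    match PySem.Dict.get? (PySem.Dict.mk e) "phase" with
    | none => groups
    | some ph =>
      if ph ∈ pvPhases then
        match PySem.Dict.get? groups ph with
        | none => PySem.Dict.insert groups ph [pvDesc e]
        | some lst =>
          if lst.length < 3 then PySem.Dict.insert groups ph (lst ++ [pvDesc e]) else groups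
      else groups) PySem.Dict.empty

def generate_phase_summary_py_alt (events : List (List (String × String))) : List (String × String) :=
  pvPhases.map (fun ph =>
    (ph, match PySem.Dict.get? (pvCollect events) ph with
         | some lst => PySem.Str.join " | " lst
         | none => "Events occurred in " ++ ph))

-- ===== PRECONDITION & SPEC =====
def Spec_generate_phase_summary_py (events : List (List (String × String))) (out : List (String × String)) : Prop := out = generate_phase_summary_py_alt events
instance (events : List (List (String × String))) (out : List (String × String)) : Decidable (Spec_generate_phase_summary_py events out) := by unfold Spec_generate_phase_summary_py; infer_instance

-- ===== CLAIM (what is proved, stated in full; the proofs are below) =====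
def Claim_equal_generate_phase_summary_py : Prop := ∀ (events : List (List (String × String))), Dom_generate_phase_summary_py events → Spec_generate_phase_summary_py events (generate_phase_summary_py events)

-- ===== LEMMAS AND PROOFS =====

-- A's per-phase value, as an expression of the phase alone.
def pvValA (events : List (List (String × String))) (phase : String) : String :=
  let phase_events := events.filter (fun e => PySem.Dict.get? (PySem.Dict.mk e) "phase" == some phase)
  if phase_events.isEmpty then "Events occurred in " ++ phase
  else PySem.Str.join " | " ((phase_events.take 3).map pvDesc)

-- the descriptions of the events matching a phase, in order
def pvDescs (events : List (List (String × String))) (ph : String) : List String :=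
  (events.filter (fun e => PySem.Dict.get? (PySem.Dict.mk e) "phase" == some ph)).map pvDesc

def pvCapAdd (o : Option (List String)) (ds : List String) : Option (List String) :=
  match o with
  | none => if ds = [] then none else some (ds.take 3)
  | some lst => some (lst ++ ds.take (3 - lst.length))

lemma pvCollect_get? (events : List (List (String × String)))
    (g : PySem.Dict String (List String)) (ph : String) (hph : ph ∈ pvPhases) :
    PySem.Dict.get? (events.foldl (fun groups e =>
      match PySem.Dict.get? (PySem.Dict.mk e) "phase" with
      | none => groups
      | some p =>
        if p ∈ pvPhases then
          match PySem.Dict.get? groups p with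
          | none => PySem.Dict.insert groups p [pvDesc e]
          | some lst =>
            if lst.length < 3 then PySem.Dict.insert groups p (lst ++ [pvDesc e]) else groups
        else groups) g) ph
    = pvCapAdd (PySem.Dict.get? g ph) (pvDescs events ph) := by
  induction events generalizing g with
  | nil =>
    simp only [List.foldl_nil, pvDescs, List.filter_nil, List.map_nil, pvCapAdd]
    cases h : PySem.Dict.get? g ph <;> simp
  | cons e rest ih =>
    simp only [List.foldl_cons]
    cases hp : PySem.Dict.get? (PySem.Dict.mk e) "phase" with
    | none =>
      rw [ih g]
      have hds : pvDescs (e :: rest) ph = pvDescs rest ph := by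
        simp [pvDescs, hp]
      rw [hds]
    | some p =>
      by_cases hmem : p ∈ pvPhases
      · simp only [hmem, if_true]
        by_cases hpe : p = ph
        · subst hpe
          have hds : pvDescs (e :: rest) p = pvDesc e :: pvDescs rest p := by
            simp [pvDescs, hp]
          cases hg : PySem.Dict.get? g p with
          | none =>
            rw [ih, hds]
            simp [pvCapAdd, PySem.Dict.get?_insert_self]
          | some lst =>
            by_cases hlen : lst.length < 3
            · simp only [hlen, if_true]
              rw [ih, hds]
              simp only [pvCapAdd, PySem.Dict.get?_insert_self, Option.some.injEq]
              have h1 : 3 - lst.length = (3 - (lst ++ [pvDesc e]).length) + 1 := by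
                simp; omega
              rw [h1, List.take_succ_cons, List.append_assoc]
              simp
            · simp only [hlen, if_false]
              rw [ih, hds]
              have h0 : 3 - lst.length = 0 := by omega
              simp [pvCapAdd, hg, h0]
        · have hds : pvDescs (e :: rest) ph = pvDescs rest ph := by
            simp only [pvDescs, List.filter_cons, hp]
            have : ((some p : Option String) == some ph) = false := by
              simp [hpe]
            simp [this]
          rw [hds]
          cases hg : PySem.Dict.get? g p with
          | none =>
            rw [ih]
            rw [PySem.Dict.get?_insert_of_ne _ _ (fun h => hpe h.symm)]
          | some lst =>
            by_cases hlen : lst.length < 3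
            · simp only [hlen, if_true]
              rw [ih]
              rw [PySem.Dict.get?_insert_of_ne _ _ (fun h => hpe h.symm)]
            · simp only [hlen, if_false]
              exact ih g
      · simp only [hmem, if_false]
        rw [ih g]
        have hpe : p ≠ ph := fun h => hmem (h ▸ hph)
        have hds : pvDescs (e :: rest) ph = pvDescs rest ph := by
          simp only [pvDescs, List.filter_cons, hp]
          have : ((some p : Option String) == some ph) = false := by
            simp [hpe]
          simp [this]
        rw [hds]

-- per phase, B's formatted value equals A's
lemma pvVal_eq (events : List (List (String × String))) (ph : String) (hph : ph ∈ pvPhases) :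
    (match PySem.Dict.get? (pvCollect events) ph with
     | some lst => PySem.Str.join " | " lst
     | none => "Events occurred in " ++ ph) = pvValA events ph := by
  have h := pvCollect_get? events PySem.Dict.empty ph hph
  rw [show (PySem.Dict.get? (PySem.Dict.empty (κ := String) (ν := List String)) ph) = none from
    PySem.Dict.get?_empty _] at h
  unfold pvCollect
  rw [h]
  unfold pvCapAdd pvValA
  by_cases hnil : events.filter (fun e => PySem.Dict.get? (PySem.Dict.mk e) "phase" == some ph) = []
  · have h0 : pvDescs events ph = [] := by
      rw [pvDescs, hnil]; rfl
    simp [h0, hnil]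
  · have h0 : ¬ pvDescs events ph = [] := by
      rw [pvDescs]; simpa using hnil
    have hfil : (events.filter (fun e => PySem.Dict.get? (PySem.Dict.mk e) "phase" == some ph)).isEmpty = false := by
      simpa [List.isEmpty_iff] using hnil
    simp only [pvDescs] at h0
    simp [pvDescs, h0, hfil, List.map_take]

lemma pvPhases_nodup : pvPhases.Nodup := by decide

lemma portA_items (events : List (List (String × String))) :
    generate_phase_summary_py events = pvPhases.map (fun ph => (ph, pvValA events ph)) := by
  unfold generate_phase_summary_py
  have hbody : (fun (summaries : PySem.Dict String String) phase =>
      let phase_events := events.filter (fun e => PySem.Dict.get? (PySem.Dict.mk e) "phase" == some phase)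
      if phase_events.isEmpty then
        PySem.Dict.insert summaries phase ("Events occurred in " ++ phase)
      else
        PySem.Dict.insert summaries phase
          (PySem.Str.join " | " ((phase_events.take 3).map pvDesc)))
      = fun summaries phase => PySem.Dict.insert summaries ((fun (x : String) => x) phase) (pvValA events phase) := by
    funext s phase
    unfold pvValA
    simp only []
    split_ifs <;> rfl
  rw [hbody]
  rw [PySem.Dict.items_foldl_insert_fresh pvPhases (fun x => x) (pvValA events) PySem.Dict.empty
    (fun a _ => PySem.Dict.contains_empty a) (by simpa using pvPhases_nodup)]
  simp [PySem.Dict.empty]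

-- ===== VERDICT (by name: the statement is the Claim_ definition above) =====
theorem generate_phase_summary_py_spec : Claim_equal_generate_phase_summary_py := by
  intro events _
  unfold Spec_generate_phase_summary_py generate_phase_summary_py_alt
  rw [portA_items]
  refine List.map_congr_left (fun ph hph => ?_)
  rw [pvVal_eq events ph hph]
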